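-- pv_equiv track=rewrite | github.com/UBene/HW_srs_sg380 | cnc_microscope/ScopeFoundryMeasurement/power_scan_map.py | ijk_zigzag_generator
-- ===== SOURCE A (Python) =====
-- def ijk_zigzag_generator(dims, axis_order=(0,1,2)):
--     """3D zig-zag scan pattern generator with arbitrary fast axis order"""
--
--     ax0, ax1, ax2 = axis_order
--
--     for i_ax0 in range( dims[ax0] ):
--         zig_or_zag0 = (1,-1)[i_ax0 % 2]
--         for i_ax1 in range( dims[ax1] )[::zig_or_zag0]:
--             zig_or_zag1 = (1,-1)[(i_ax0+i_ax1) % 2]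
--             for i_ax2 in range( dims[ax2] )[::zig_or_zag1]:
--
--                 ijk = [0,0,0]
--                 ijk[ax0] = i_ax0
--                 ijk[ax1] = i_ax1
--                 ijk[ax2] = i_ax2
--
--                 yield tuple(ijk)
--     return
-- ===== SOURCE B (Python) =====
-- def ijk_zigzag_generator(dims, axis_order=(0,1,2)):
--     """3D zig-zag scan pattern generator, flat-index formulation: one loop over
--     the total point count, decoded into grid indices with two divmods and
--     parity reflections."""
--     ax0, ax1, ax2 = axis_order
--     n0 = max(dims[ax0], 0)
--     n1 = max(dims[ax1], 0)
--     n2 = max(dims[ax2], 0)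
--     for n in range(n0 * n1 * n2):
--         i0, r = divmod(n, n1 * n2)
--         d1, d2 = divmod(r, n2)
--         i1 = d1 if i0 % 2 == 0 else n1 - 1 - d1
--         i2 = d2 if (i0 + i1) % 2 == 0 else n2 - 1 - d2
--         ijk = [0, 0, 0]
--         ijk[ax0] = i0
--         ijk[ax1] = i1
--         ijk[ax2] = i2
--         yield tuple(ijk)
-- ===== Notes on version B (the rewrite author's own statement) =====
-- stated objective: alternative
-- what changed: The three nested zig-zag loops (with reversed ranges) are replaced by one flat loop over the total point count whose index is decoded by two divmods and parity reflections into the grid indices.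
-- outside the precondition, e.g. on ijk_zigzag_generator((0, 1, 1), (0, 5, 1)): A returns [], B raises IndexError
import Mathlib
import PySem

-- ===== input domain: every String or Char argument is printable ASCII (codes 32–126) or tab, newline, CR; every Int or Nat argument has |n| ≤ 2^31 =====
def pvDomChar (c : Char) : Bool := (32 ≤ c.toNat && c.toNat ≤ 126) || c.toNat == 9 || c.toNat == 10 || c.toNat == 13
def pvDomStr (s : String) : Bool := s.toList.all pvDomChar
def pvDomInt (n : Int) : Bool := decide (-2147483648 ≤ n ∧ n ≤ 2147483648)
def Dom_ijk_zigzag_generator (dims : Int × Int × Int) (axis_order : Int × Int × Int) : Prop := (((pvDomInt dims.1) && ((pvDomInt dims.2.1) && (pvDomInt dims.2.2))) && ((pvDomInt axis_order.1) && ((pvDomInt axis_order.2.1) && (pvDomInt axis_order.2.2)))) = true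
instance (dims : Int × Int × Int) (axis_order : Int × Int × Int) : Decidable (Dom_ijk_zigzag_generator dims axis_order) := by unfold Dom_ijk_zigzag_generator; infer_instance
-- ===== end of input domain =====

-- B replaces the three nested zig-zag loops by ONE loop over the flat point count,
-- decoding each flat index with two divmods plus parity reflections (objective: alternative decomposition).

-- ===== PORT A =====
-- ijk[ax] = v  (Python list assignment, negative index from the end; out of range = no-op, excluded by Pre_)
def pvSet (xs : List Int) (i v : Int) : List Int :=
  match PySem.List.pyIdx? xs.length i with
  | some j => xs.set j v
  | none => xs

-- ijk = [0,0,0]; ijk[ax0] = i0; ijk[ax1] = i1; ijk[ax2] = i2; tuple(ijk)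
def pvScatter (ax0 ax1 ax2 i0 i1 i2 : Int) : Int × Int × Int :=
  let ijk := pvSet (pvSet (pvSet [0, 0, 0] ax0 i0) ax1 i1) ax2 i2
  (ijk.getD 0 0, ijk.getD 1 0, ijk.getD 2 0)

def ijk_zigzag_generator (dims : Int × Int × Int) (axis_order : Int × Int × Int) : List (Int × Int × Int) :=
  let ax0 := axis_order.1
  let ax1 := axis_order.2.1
  let ax2 := axis_order.2.2
  let dl := [dims.1, dims.2.1, dims.2.2]
  (PySem.List.pyRange 0 ((PySem.List.pyGet? dl ax0).getD 0) 1).flatMap (fun i_ax0 =>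
    let zig0 := (PySem.List.pyGet? [1, -1] (PySem.Int.mod i_ax0 2)).getD 0
    ((PySem.List.slice? (PySem.List.pyRange 0 ((PySem.List.pyGet? dl ax1).getD 0) 1) none none zig0).getD []).flatMap (fun i_ax1 =>
      let zig1 := (PySem.List.pyGet? [1, -1] (PySem.Int.mod (i_ax0 + i_ax1) 2)).getD 0
      ((PySem.List.slice? (PySem.List.pyRange 0 ((PySem.List.pyGet? dl ax2).getD 0) 1) none none zig1).getD []).map (fun i_ax2 =>
        pvScatter ax0 ax1 ax2 i_ax0 i_ax1 i_ax2)))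

-- ===== PORT B =====
def ijk_zigzag_generator_alt (dims : Int × Int × Int) (axis_order : Int × Int × Int) : List (Int × Int × Int) :=
  let ax0 := axis_order.1
  let ax1 := axis_order.2.1
  let ax2 := axis_order.2.2
  let dl := [dims.1, dims.2.1, dims.2.2]
  let n0 := max ((PySem.List.pyGet? dl ax0).getD 0) 0
  let n1 := max ((PySem.List.pyGet? dl ax1).getD 0) 0
  let n2 := max ((PySem.List.pyGet? dl ax2).getD 0) 0
  (PySem.List.pyRange 0 (n0 * n1 * n2) 1).map (fun n =>
    let i0 := PySem.Int.floordiv n (n1 * n2)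
    let r := PySem.Int.mod n (n1 * n2)
    let d1 := PySem.Int.floordiv r n2
    let d2 := PySem.Int.mod r n2
    let i1 := if PySem.Int.mod i0 2 = 0 then d1 else n1 - 1 - d1
    let i2 := if PySem.Int.mod (i0 + i1) 2 = 0 then d2 else n2 - 1 - d2
    pvScatter ax0 ax1 ax2 i0 i1 i2)

-- ===== PRECONDITION & SPEC =====
-- Pre_ excludes inputs where an entry of axis_order is outside [-3, 2]: Python A raises IndexError on
-- every such input it actually indexes with, except when an earlier dimension is empty so the bad axis
-- is never reached (A then returns []); B indexes all three axes up front and raises there.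
def Pre_ijk_zigzag_generator (dims : Int × Int × Int) (axis_order : Int × Int × Int) : Prop :=
  (-3 ≤ axis_order.1 ∧ axis_order.1 < 3) ∧ (-3 ≤ axis_order.2.1 ∧ axis_order.2.1 < 3) ∧
    (-3 ≤ axis_order.2.2 ∧ axis_order.2.2 < 3)
instance (dims : Int × Int × Int) (axis_order : Int × Int × Int) : Decidable (Pre_ijk_zigzag_generator dims axis_order) := by unfold Pre_ijk_zigzag_generator; infer_instance

def pvWitness_ijk_zigzag_generator : (Int × Int × Int) × (Int × Int × Int) := ((2, 3, 2), (0, 1, 2))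

def Spec_ijk_zigzag_generator (dims : Int × Int × Int) (axis_order : Int × Int × Int) (out : List (Int × Int × Int)) : Prop := out = ijk_zigzag_generator_alt dims axis_order
instance (dims : Int × Int × Int) (axis_order : Int × Int × Int) (out : List (Int × Int × Int)) : Decidable (Spec_ijk_zigzag_generator dims axis_order out) := by unfold Spec_ijk_zigzag_generator; infer_instance

-- ===== CLAIM (what is proved, stated in full; the proofs are below) =====
def Claim_equal_ijk_zigzag_generator : Prop := ∀ (dims : Int × Int × Int) (axis_order : Int × Int × Int), Dom_ijk_zigzag_generator dims axis_order → Pre_ijk_zigzag_generator dims axis_order → Spec_ijk_zigzag_generator dims axis_order (ijk_zigzag_generator dims axis_order)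

-- ===== LEMMAS AND PROOFS =====

-- the zig-zag middle/inner list: range m, reversed when p is odd
def pvZZ (m p : Nat) : List Nat := if p % 2 = 0 then List.range m else (List.range m).reverse

-- canonical form of A's nested loops, over Nat indices
def pvCanon {α : Type} (a b c : Nat) (f : Nat → Nat → Nat → α) : List α :=
  (List.range a).flatMap (fun i0 =>
    (pvZZ b i0).flatMap (fun i1 =>
      (pvZZ c (i0 + i1)).map (fun i2 => f i0 i1 i2)))

-- canonical form of B's flat loop, over Nat indices
def pvCanonB {α : Type} (a b c : Nat) (f : Nat → Nat → Nat → α) : List α :=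
  (List.range (a * (b * c))).map (fun n =>
    let i0 := n / (b * c)
    let r := n % (b * c)
    let d1 := r / c
    let d2 := r % c
    let i1 := if i0 % 2 = 0 then d1 else b - 1 - d1
    let i2 := if (i0 + i1) % 2 = 0 then d2 else c - 1 - d2
    f i0 i1 i2)

theorem pv_flatMap_congr {α β : Type} {l : List α} {f g : α → List β}
    (h : ∀ x ∈ l, f x = g x) : l.flatMap f = l.flatMap g := by
  induction l with
  | nil => rfl
  | cons x xs ih =>
    rw [List.flatMap_cons, List.flatMap_cons, h x (by simp),
      ih (fun y hy => h y (by simp [hy]))]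

theorem pv_filterMap_getElem? {α : Type} (l : List α) :
    List.filterMap (fun i => l[i]?) (List.range l.length) = l := by
  induction l with
  | nil => simp
  | cons x xs ih =>
    rw [List.length_cons, List.range_succ_eq_map, List.filterMap_cons]
    simp only [List.getElem?_cons_zero, List.filterMap_map, Function.comp_def,
      List.getElem?_cons_succ]
    rw [ih]

-- xs[::1] is xs
theorem pv_slice?_one {α : Type} (xs : List α) : PySem.List.slice? xs none none 1 = some xs := by
  simp only [PySem.List.slice?, PySem.List.sliceIndices]
  norm_num
  rw [show (if 0 < xs.length then xs.length else 0) = xs.length by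
    by_cases h : 0 < xs.length <;> simp [h] <;> omega]
  exact pv_filterMap_getElem? xs

-- reversed range as a reflection map
theorem pv_range_reverse (m : Nat) :
    (List.range m).reverse = (List.range m).map (fun d => m - 1 - d) := by
  apply List.ext_getElem
  · simp
  · intro i h1 h2
    simp only [List.getElem_reverse, List.length_range, List.getElem_range, List.getElem_map]

theorem pv_range_mul {α : Type} (a m : Nat) (h : Nat → α) :
    (List.range (a * m)).map h =
      (List.range a).flatMap (fun i => (List.range m).map (fun j => h (i * m + j))) := by
  induction a with
  | zero => simp
  | succ a ih =>
    rw [Nat.succ_mul, List.range_add, List.map_append, List.map_map, ih,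
      List.range_succ, List.flatMap_append]
    simp [Function.comp_def]

theorem pv_zz_map {α : Type} (m p : Nat) (g : Nat → α) :
    (pvZZ m p).map g = (List.range m).map (fun d => g (if p % 2 = 0 then d else m - 1 - d)) := by
  by_cases hp : p % 2 = 0 <;>
    simp [pvZZ, hp, pv_range_reverse, List.map_map, Function.comp_def]

theorem pv_zz_flatMap {α : Type} (m p : Nat) (g : Nat → List α) :
    (pvZZ m p).flatMap g = (List.range m).flatMap (fun d => g (if p % 2 = 0 then d else m - 1 - d)) := by
  by_cases hp : p % 2 = 0 <;>
    simp [pvZZ, hp, pv_range_reverse, List.flatMap_map]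

theorem pv_canonB_eq_canon {α : Type} (a b c : Nat) (f : Nat → Nat → Nat → α) :
    pvCanonB a b c f = pvCanon a b c f := by
  rcases Nat.eq_zero_or_pos b with hb | hb
  · subst hb; simp [pvCanonB, pvCanon, pvZZ]
  rcases Nat.eq_zero_or_pos c with hc | hc
  · subst hc; simp [pvCanonB, pvCanon, pvZZ]
  have hbc : 0 < b * c := Nat.mul_pos hb hc
  unfold pvCanonB pvCanon
  rw [pv_range_mul]
  apply pv_flatMap_congr
  intro i0 _
  rw [pv_range_mul b c]
  rw [pv_zz_flatMap]
  apply pv_flatMap_congr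
  intro d1 hd1
  rw [List.mem_range] at hd1
  rw [pv_zz_map]
  apply List.map_congr_left
  intro d2 hd2
  rw [List.mem_range] at hd2
  have hj : d1 * c + d2 < b * c := by
    calc d1 * c + d2 < (d1 + 1) * c := by rw [Nat.add_mul]; omega
    _ ≤ b * c := Nat.mul_le_mul_right c hd1
  have e1 : (i0 * (b * c) + (d1 * c + d2)) / (b * c) = i0 := by
    rw [Nat.mul_comm i0, Nat.mul_add_div hbc, Nat.div_eq_of_lt hj]
    omega
  have e2 : (i0 * (b * c) + (d1 * c + d2)) % (b * c) = d1 * c + d2 := by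
    rw [Nat.mul_comm i0, Nat.mul_add_mod, Nat.mod_eq_of_lt hj]
  have e3 : (d1 * c + d2) / c = d1 := by
    rw [Nat.mul_comm d1, Nat.mul_add_div hc, Nat.div_eq_of_lt hd2]
    omega
  have e4 : (d1 * c + d2) % c = d2 := by
    rw [Nat.mul_comm d1, Nat.mul_add_mod, Nat.mod_eq_of_lt hd2]
  simp only [e1, e2, e3, e4]

-- middle/inner level of A: a mapped range sliced with step (1,-1)[p % 2] is pvZZ
theorem pv_innerA_eq {α : Type} (m p : Nat) (h : Int → α) :
    ((PySem.List.slice? ((List.range m).map (fun k : Nat => (k : Int))) none none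
        ((PySem.List.pyGet? [1, -1] ((p % 2 : Nat) : Int)).getD 0)).getD []).map h
      = (pvZZ m p).map (fun z : Nat => h (z : Int)) := by
  by_cases hp : p % 2 = 0
  · rw [hp]
    simp only [Nat.cast_zero]
    rw [show PySem.List.pyGet? [(1 : Int), -1] 0 = some 1 from by decide]
    simp only [Option.getD_some]
    rw [pv_slice?_one]
    simp [pvZZ, hp, List.map_map, Function.comp_def]
  · have hp1 : p % 2 = 1 := by omega
    rw [hp1]
    simp only [Nat.cast_one]
    rw [show PySem.List.pyGet? [(1 : Int), -1] 1 = some (-1) from by decide]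
    simp only [Option.getD_some]
    rw [PySem.List.slice?_none_none_neg_one]
    simp only [Option.getD_some]
    simp [pvZZ, hp, ← List.map_reverse, List.map_map, Function.comp_def]

theorem pv_midA_eq {α : Type} (m p : Nat) (h : Int → List α) :
    ((PySem.List.slice? ((List.range m).map (fun k : Nat => (k : Int))) none none
        ((PySem.List.pyGet? [1, -1] ((p % 2 : Nat) : Int)).getD 0)).getD []).flatMap h
      = (pvZZ m p).flatMap (fun z : Nat => h (z : Int)) := by
  by_cases hp : p % 2 = 0
  · rw [hp]
    simp only [Nat.cast_zero]
    rw [show PySem.List.pyGet? [(1 : Int), -1] 0 = some 1 from by decide]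
    simp only [Option.getD_some]
    rw [pv_slice?_one]
    simp [pvZZ, hp, List.flatMap_map]
  · have hp1 : p % 2 = 1 := by omega
    rw [hp1]
    simp only [Nat.cast_one]
    rw [show PySem.List.pyGet? [(1 : Int), -1] 1 = some (-1) from by decide]
    simp only [Option.getD_some]
    rw [PySem.List.slice?_none_none_neg_one]
    simp only [Option.getD_some]
    simp [pvZZ, hp, ← List.map_reverse, List.flatMap_map]

theorem pv_portA_eq_canon (dims axis_order : Int × Int × Int) :
    ijk_zigzag_generator dims axis_order =
      pvCanon ((PySem.List.pyGet? [dims.1, dims.2.1, dims.2.2] axis_order.1).getD 0).toNat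
        ((PySem.List.pyGet? [dims.1, dims.2.1, dims.2.2] axis_order.2.1).getD 0).toNat
        ((PySem.List.pyGet? [dims.1, dims.2.1, dims.2.2] axis_order.2.2).getD 0).toNat
        (fun x y z => pvScatter axis_order.1 axis_order.2.1 axis_order.2.2 x y z) := by
  simp only [ijk_zigzag_generator, pvCanon, PySem.List.pyRange_one, zero_add, sub_zero,
    List.flatMap_map]
  apply pv_flatMap_congr
  intro i0 _
  rw [show PySem.Int.mod ((i0 : Nat) : Int) 2 = ((i0 % 2 : Nat) : Int) from by
    exact_mod_cast PySem.Int.mod_natCast i0 2]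
  rw [pv_midA_eq]
  apply pv_flatMap_congr
  intro i1 _
  rw [show PySem.Int.mod (((i0 : Nat) : Int) + ((i1 : Nat) : Int)) 2 = (((i0 + i1) % 2 : Nat) : Int) from by
    rw [show (((i0 : Nat) : Int) + ((i1 : Nat) : Int)) = (((i0 + i1 : Nat)) : Int) from by push_cast; ring]
    exact_mod_cast PySem.Int.mod_natCast (i0 + i1) 2]
  rw [pv_innerA_eq]

theorem pv_portB_eq_canonB (dims axis_order : Int × Int × Int) :
    ijk_zigzag_generator_alt dims axis_order =
      pvCanonB ((PySem.List.pyGet? [dims.1, dims.2.1, dims.2.2] axis_order.1).getD 0).toNat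
        ((PySem.List.pyGet? [dims.1, dims.2.1, dims.2.2] axis_order.2.1).getD 0).toNat
        ((PySem.List.pyGet? [dims.1, dims.2.1, dims.2.2] axis_order.2.2).getD 0).toNat
        (fun x y z => pvScatter axis_order.1 axis_order.2.1 axis_order.2.2 x y z) := by
  simp only [ijk_zigzag_generator_alt, pvCanonB]
  set a := ((PySem.List.pyGet? [dims.1, dims.2.1, dims.2.2] axis_order.1).getD 0).toNat with ha
  set b := ((PySem.List.pyGet? [dims.1, dims.2.1, dims.2.2] axis_order.2.1).getD 0).toNat with hb
  set c := ((PySem.List.pyGet? [dims.1, dims.2.1, dims.2.2] axis_order.2.2).getD 0).toNat with hc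
  simp only [← Int.toNat_eq_max, ← ha, ← hb, ← hc]
  rw [show ((a : Int) * (b : Int) * (c : Int)) = (((a * (b * c) : Nat)) : Int) from by push_cast; ring]
  rw [PySem.List.pyRange_one]
  simp only [zero_add, sub_zero, Int.toNat_natCast, List.map_map, Function.comp_def]
  apply List.map_congr_left
  intro n hn
  rw [List.mem_range] at hn
  have hbc : 0 < b * c := by
    rcases Nat.eq_zero_or_pos (b * c) with h0 | h0
    · rw [h0, Nat.mul_zero] at hn; omega
    · exact h0
  have hcpos : 0 < c := by
    rcases Nat.eq_zero_or_pos c with h0 | h0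
    · rw [h0, Nat.mul_zero] at hbc; omega
    · exact h0
  have e0 : ((b : Int) * (c : Int)) = (((b * c : Nat)) : Int) := by push_cast; ring
  have hd1 : (n % (b * c)) / c < b := by
    rw [Nat.div_lt_iff_lt_mul hcpos]
    exact Nat.lt_of_lt_of_le (Nat.mod_lt n hbc) (by rw [Nat.mul_comm])
  have hd2 : (n % (b * c)) % c < c := Nat.mod_lt _ hcpos
  simp only [e0, PySem.Int.floordiv_natCast, PySem.Int.mod_natCast]
  have h1 : (if PySem.Int.mod (((n / (b * c) : Nat)) : Int) 2 = 0
        then (((n % (b * c) / c : Nat)) : Int)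
        else (b : Int) - 1 - (((n % (b * c) / c : Nat)) : Int))
      = (((if n / (b * c) % 2 = 0 then n % (b * c) / c else b - 1 - n % (b * c) / c : Nat)) : Int) := by
    rw [show PySem.Int.mod (((n / (b * c) : Nat)) : Int) 2 = (((n / (b * c) % 2 : Nat)) : Int) from by
      exact_mod_cast PySem.Int.mod_natCast (n / (b * c)) 2]
    by_cases hp : n / (b * c) % 2 = 0
    · simp [hp]
    · rw [if_neg (by exact_mod_cast hp), if_neg hp]
      omega
  rw [h1]
  have h2 : (if PySem.Int.mod ((((n / (b * c) : Nat)) : Int)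
          + (((if n / (b * c) % 2 = 0 then n % (b * c) / c else b - 1 - n % (b * c) / c : Nat)) : Int)) 2 = 0
        then (((n % (b * c) % c : Nat)) : Int)
        else (c : Int) - 1 - (((n % (b * c) % c : Nat)) : Int))
      = (((if (n / (b * c) + (if n / (b * c) % 2 = 0 then n % (b * c) / c else b - 1 - n % (b * c) / c)) % 2 = 0
            then n % (b * c) % c
            else c - 1 - n % (b * c) % c : Nat)) : Int) := by
    rw [show ((((n / (b * c) : Nat)) : Int)
          + (((if n / (b * c) % 2 = 0 then n % (b * c) / c else b - 1 - n % (b * c) / c : Nat)) : Int))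
        = (((n / (b * c) + (if n / (b * c) % 2 = 0 then n % (b * c) / c else b - 1 - n % (b * c) / c) : Nat)) : Int) from by
      push_cast; ring]
    rw [show PySem.Int.mod (((n / (b * c) + (if n / (b * c) % 2 = 0 then n % (b * c) / c else b - 1 - n % (b * c) / c) : Nat)) : Int) 2
        = (((((n / (b * c) + (if n / (b * c) % 2 = 0 then n % (b * c) / c else b - 1 - n % (b * c) / c)) % 2 : Nat))) : Int) from by
      exact_mod_cast PySem.Int.mod_natCast _ 2]
    by_cases hq : (n / (b * c) + (if n / (b * c) % 2 = 0 then n % (b * c) / c else b - 1 - n % (b * c) / c)) % 2 = 0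
    · simp [hq]
    · rw [if_neg (by exact_mod_cast hq), if_neg hq]
      omega
  rw [h2]

-- ===== VERDICT (by name: the statement is the Claim_ definition above) =====
theorem ijk_zigzag_generator_spec : Claim_equal_ijk_zigzag_generator := by
  intro dims axis_order _ _
  unfold Spec_ijk_zigzag_generator
  rw [pv_portA_eq_canon, pv_portB_eq_canonB, pv_canonB_eq_canon]
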